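-- pv_equiv track=rewrite | github.com/cviroulaud/cviroulaud.github.io | terminale/algorithmique/arbres/exercices-arbre-binaire/scripts/arbre-genealogique.py | ascendant_homme
-- ===== SOURCE A (Python) =====
-- def ascendant_homme(tab: list, hommes: list)->list:
--     p = []
--     p.append(1)
--     while len(p) > 0:
--         en_cours = p.pop()
--         if en_cours < len(tab):
--             # enregistre ascendant hommes
--             if en_cours%2 == 0 and en_cours > 1:
--                 hommes.append(tab[en_cours])
--
--             p.append(2*en_cours+1)
--             p.append(2*en_cours)
--     return hommes
-- ===== SOURCE B (Python) =====
-- def ascendant_homme(tab: list, hommes: list) -> list: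
--     n = len(tab)
--
--     def visit(i):
--         if i >= n:
--             return
--         if i % 2 == 0 and i > 1:
--             hommes.append(tab[i])
--         visit(2 * i)
--         visit(2 * i + 1)
--
--     visit(1)
--     return hommes
-- ===== Notes on version B (the rewrite author's own statement) =====
-- stated objective: alternative
-- what changed: Replaces the explicit LIFO stack loop with a recursive preorder traversal of the array-encoded tree (visit(i) -> visit(2i), visit(2i+1)), preserving the exact visit order and in-place appends.
import Mathlib
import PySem

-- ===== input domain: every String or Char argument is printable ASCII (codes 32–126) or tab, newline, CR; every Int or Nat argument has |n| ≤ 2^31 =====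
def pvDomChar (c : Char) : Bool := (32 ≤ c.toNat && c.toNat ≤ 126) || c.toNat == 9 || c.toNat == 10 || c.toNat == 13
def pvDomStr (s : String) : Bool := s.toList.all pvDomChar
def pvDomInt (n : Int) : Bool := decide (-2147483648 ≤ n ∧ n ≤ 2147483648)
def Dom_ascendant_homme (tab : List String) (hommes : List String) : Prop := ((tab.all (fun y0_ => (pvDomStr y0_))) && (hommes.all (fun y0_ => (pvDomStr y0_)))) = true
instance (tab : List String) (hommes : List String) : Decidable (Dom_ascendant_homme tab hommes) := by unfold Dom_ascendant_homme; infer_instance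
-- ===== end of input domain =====

-- B replaces A's explicit LIFO stack with a recursive preorder traversal of the
-- array-encoded binary tree; same visit order, same result. (Both Pythons mutate
-- `hommes` in place and return it; the equivalence proved here is about the return value.)


-- ===== PORT A =====
-- Size of the subtree of indices rooted at i that lie below n (termination measure
-- for the stack loop; not part of the computation).
def pvSize (n : Nat) (i : Nat) : Nat :=
  if h : 1 ≤ i ∧ i < n then 1 + pvSize n (2*i) + pvSize n (2*i+1) else 0
termination_by n - i
decreasing_by all_goals omega

def pvSizes (n : Nat) (p : List Nat) : Nat := (p.map (pvSize n)).sum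

-- A's while-loop over the explicit stack `p` (head = top, pop = head; pushing
-- 2e+1 then 2e leaves 2e on top, hence head order 2e :: 2e+1 :: rest).
-- The hypothesis `hp` (all stack entries ≥ 1) is an invariant of A's loop,
-- carried only for termination.
def ascendant_homme_loop (tab : List String) (hommes : List String) (p : List Nat)
    (hp : ∀ x ∈ p, 1 ≤ x) : List String :=
  match p with
  | [] => hommes
  | e :: rest =>
    if he : e < tab.length then
      let hommes' := if e % 2 = 0 ∧ 1 < e then hommes ++ [tab.getD e ""] else hommes
      ascendant_homme_loop tab hommes' (2*e :: (2*e+1) :: rest)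
        (by intro x hx
            have h1 := hp e (by simp)
            simp only [List.mem_cons] at hx
            rcases hx with h | h | h
            · omega
            · omega
            · exact hp x (by simp [h]))
    else
      ascendant_homme_loop tab hommes rest (fun x hx => hp x (by simp [hx]))
termination_by (pvSizes tab.length p, p.length)
decreasing_by
  · apply Prod.Lex.left
    have h1 : 1 ≤ e := hp e (by simp)
    have : pvSize tab.length e = 1 + pvSize tab.length (2*e) + pvSize tab.length (2*e+1) := by
      rw [pvSize]; simp [h1, he]
    simp [pvSizes]; omega
  · have : pvSize tab.length e = 0 := by
      rw [pvSize]; simp; omega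
    have hs : pvSizes tab.length (e :: rest) = pvSizes tab.length rest := by
      simp [pvSizes, this]
    rw [hs]
    apply Prod.Lex.right
    simp

def ascendant_homme (tab : List String) (hommes : List String) : List String :=
  ascendant_homme_loop tab hommes [1] (by simp)

-- ===== PORT B =====
-- Source B's recursive `visit`, with `hommes` threaded as the accumulator it mutates.
-- The inner `1 ≤ i` test is only a totality guard (visit is only ever reached
-- with i ≥ 1); the `acc` it returns there is never used.
def ascendant_homme_visit (tab : List String) (i : Nat) (acc : List String) : List String :=
  if h : i < tab.length then
    if h1 : 1 ≤ i then
      let acc := if i % 2 = 0 ∧ 1 < i then acc ++ [tab.getD i ""] else acc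
      ascendant_homme_visit tab (2*i+1) (ascendant_homme_visit tab (2*i) acc)
    else acc
  else acc
termination_by tab.length - i
decreasing_by all_goals omega

def ascendant_homme_alt (tab : List String) (hommes : List String) : List String :=
  ascendant_homme_visit tab 1 hommes

-- ===== PRECONDITION & SPEC =====
def Spec_ascendant_homme (tab : List String) (hommes : List String) (out : List String) : Prop := out = ascendant_homme_alt tab hommes
instance (tab : List String) (hommes : List String) (out : List String) : Decidable (Spec_ascendant_homme tab hommes out) := by unfold Spec_ascendant_homme; infer_instance

-- ===== CLAIM (what is proved, stated in full; the proofs are below) =====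
def Claim_equal_ascendant_homme : Prop := ∀ (tab : List String) (hommes : List String), Dom_ascendant_homme tab hommes → Spec_ascendant_homme tab hommes (ascendant_homme tab hommes)

-- ===== LEMMAS AND PROOFS =====

lemma visit_of_lt (tab : List String) (i : Nat) (acc : List String)
    (h : i < tab.length) (h1 : 1 ≤ i) :
    ascendant_homme_visit tab i acc =
      ascendant_homme_visit tab (2*i+1)
        (ascendant_homme_visit tab (2*i)
          (if i % 2 = 0 ∧ 1 < i then acc ++ [tab.getD i ""] else acc)) := by
  rw [ascendant_homme_visit]
  simp [h, h1]

lemma visit_of_ge (tab : List String) (i : Nat) (acc : List String)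
    (h : ¬ i < tab.length) :
    ascendant_homme_visit tab i acc = acc := by
  rw [ascendant_homme_visit]
  simp [h]

-- A's stack loop folds B's recursive visit over the stack, top first.
lemma loop_eq_foldl_visit (tab : List String) (hommes : List String) (p : List Nat)
    (hp : ∀ x ∈ p, 1 ≤ x) :
    ascendant_homme_loop tab hommes p hp =
      p.foldl (fun acc e => ascendant_homme_visit tab e acc) hommes := by
  fun_induction ascendant_homme_loop tab hommes p hp
  case case1 => simp
  case case2 =>
    rename_i hommes e rest hp1 he hommes' hp2 ih
    rw [ih]
    simp only [List.foldl_cons]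
    rw [visit_of_lt tab e hommes he (hp1 e (by simp))]
    show List.foldl _ (ascendant_homme_visit tab (2*e+1) (ascendant_homme_visit tab (2*e)
      (if h : e % 2 = 0 ∧ 1 < e then hommes ++ [tab.getD e ""] else hommes))) rest = _
    rw [dite_eq_ite]
  case case3 =>
    rename_i hommes e rest hp1 he hp2 ih
    rw [ih]
    simp only [List.foldl_cons]
    rw [visit_of_ge tab e hommes he]

-- ===== VERDICT (by name: the statement is the Claim_ definition above) =====
theorem ascendant_homme_spec : Claim_equal_ascendant_homme := by
  intro tab hommes _
  unfold Spec_ascendant_homme ascendant_homme ascendant_homme_alt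
  rw [loop_eq_foldl_visit]
  simp
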